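-- pv_equiv track=rewrite | github.com/brian-lai/PolyC | searchAlgorithm/search_refine.py | compute_doc_frequencies
-- ===== SOURCE A (Python) =====
-- def compute_doc_frequencies(documents_hash_tables, query_vector):
--     doc_frequencies = {}
--     for key in query_vector:
--         sum_docs = 0
--         for j in range(len(documents_hash_tables)):
--             if key in documents_hash_tables[j]:
--                 sum_docs += 1
--         doc_frequencies[key] = sum_docs
--     return doc_frequencies
-- ===== SOURCE B (Python) =====
-- def compute_doc_frequencies(documents_hash_tables, query_vector):
--     query_set = set(query_vector)
--     doc_frequencies = {key: 0 for key in query_vector}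
--     for table in documents_hash_tables:
--         for key in table:
--             if key in query_set:
--                 doc_frequencies[key] += 1
--     return doc_frequencies
-- ===== Notes on version B (the rewrite author's own statement) =====
-- stated objective: faster
-- what changed: Instead of probing every document for each query key (query-major nested loops, O(|query|*#docs) probes), B pre-seeds a zero count per query key, then makes one pass over the documents, incrementing the count of each document key found in a precomputed query set.
import Mathlib
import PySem

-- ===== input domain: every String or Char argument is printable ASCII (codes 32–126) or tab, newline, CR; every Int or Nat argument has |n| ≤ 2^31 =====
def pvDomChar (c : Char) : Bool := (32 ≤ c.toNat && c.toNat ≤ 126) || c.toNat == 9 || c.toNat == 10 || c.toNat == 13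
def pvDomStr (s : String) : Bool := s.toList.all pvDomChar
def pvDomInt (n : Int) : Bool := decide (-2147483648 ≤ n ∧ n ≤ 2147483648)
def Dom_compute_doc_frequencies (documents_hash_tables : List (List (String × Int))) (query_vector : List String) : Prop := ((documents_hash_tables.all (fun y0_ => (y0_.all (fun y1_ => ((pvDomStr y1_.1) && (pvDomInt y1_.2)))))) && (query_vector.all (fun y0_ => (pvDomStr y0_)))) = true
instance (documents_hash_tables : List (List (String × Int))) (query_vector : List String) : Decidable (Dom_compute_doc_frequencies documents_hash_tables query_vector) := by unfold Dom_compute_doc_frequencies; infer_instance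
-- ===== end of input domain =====

-- B replaces A's query-major nested probing (for each query key, probe every document;
-- O(|query| * #docs) probes) by pre-seeding a zero count per query key and making a single
-- pass over the documents, incrementing the count of each document key that lies in a
-- precomputed query set (O(total document keys + |query|)); measured faster in a timing run.

-- ===== PORT A =====
-- for key in query_vector: sum over j in range(len(docs)) of (key in docs[j]); dict[key] = sum
def compute_doc_frequencies (documents_hash_tables : List (List (String × Int))) (query_vector : List String) : List (String × Int) :=
  (query_vector.foldl (fun doc_frequencies key =>
      doc_frequencies.insert key
        ((PySem.List.pyRange 0 (PySem.List.len documents_hash_tables)).foldl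
          (fun sum_docs j =>
            if (PySem.Dict.mk (PySem.List.pyGetD documents_hash_tables j [])).contains key
            then sum_docs + 1 else sum_docs)
          (0 : Int)))
    PySem.Dict.empty).items

-- ===== PORT B =====
-- query_set = set(query_vector); seed {key: 0 for key in query_vector}; one pass over the
-- documents, incrementing the count of each (distinct) document key found in query_set.
def compute_doc_frequencies_alt (documents_hash_tables : List (List (String × Int))) (query_vector : List String) : List (String × Int) :=
  let query_set : PySem.Set String := PySem.Set.ofList query_vector
  let seeded : PySem.Dict String Int :=
    query_vector.foldl (fun d key => d.insert key 0) PySem.Dict.empty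
  (documents_hash_tables.foldl (fun doc_frequencies table =>
      (PySem.List.dedup (table.map Prod.fst)).foldl
        (fun d key =>
          if query_set.contains key then d.insert key (d.getD key 0 + 1) else d)
        doc_frequencies)
    seeded).items

-- ===== PRECONDITION & SPEC =====
def Spec_compute_doc_frequencies (documents_hash_tables : List (List (String × Int))) (query_vector : List String) (out : List (String × Int)) : Prop := out = compute_doc_frequencies_alt documents_hash_tables query_vector
instance (documents_hash_tables : List (List (String × Int))) (query_vector : List String) (out : List (String × Int)) : Decidable (Spec_compute_doc_frequencies documents_hash_tables query_vector out) := by unfold Spec_compute_doc_frequencies; infer_instance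

-- ===== CLAIM (what is proved, stated in full; the proofs are below) =====
def Claim_equal_compute_doc_frequencies : Prop := ∀ (documents_hash_tables : List (List (String × Int))) (query_vector : List String), Dom_compute_doc_frequencies documents_hash_tables query_vector → Spec_compute_doc_frequencies documents_hash_tables query_vector (compute_doc_frequencies documents_hash_tables query_vector)

-- ===== LEMMAS AND PROOFS =====

-- reference count: number of tables containing key k (membership among first components)
def pvDocCount (dht : List (List (String × Int))) (k : String) : Int :=
  dht.foldl (fun s t => if k ∈ t.map Prod.fst then s + 1 else s) 0

theorem pvFoldl_count_shift (dht : List (List (String × Int))) (k : String) (s : Int) :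
    dht.foldl (fun s t => if k ∈ t.map Prod.fst then s + 1 else s) s = s + pvDocCount dht k := by
  induction dht generalizing s with
  | nil => simp [pvDocCount]
  | cons t dht ih =>
    simp only [pvDocCount, List.foldl_cons] at *
    rw [ih (if k ∈ t.map Prod.fst then s + 1 else s),
      ih (if k ∈ t.map Prod.fst then (0:Int) + 1 else 0)]
    split_ifs <;> omega

theorem pvAny_eq_mem (t : List (String × Int)) (key : String) :
    (PySem.Dict.mk t).contains key = true ↔ key ∈ t.map Prod.fst := by
  rw [PySem.Dict.contains_mk]
  simp only [List.any_eq_true, beq_iff_eq, List.mem_map]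

-- A's inner index loop computes pvDocCount
theorem pvA_inner (dht : List (List (String × Int))) (key : String) :
    (PySem.List.pyRange 0 (PySem.List.len dht)).foldl
      (fun sum_docs j =>
        if (PySem.Dict.mk (PySem.List.pyGetD dht j [])).contains key
        then sum_docs + 1 else sum_docs) (0 : Int) = pvDocCount dht key := by
  rw [PySem.List.foldl_pyRange_zero_pyGetD dht []
    (fun sum_docs t => if (PySem.Dict.mk t).contains key then sum_docs + 1 else sum_docs) 0]
  unfold pvDocCount
  apply PySem.List.foldl_congr_mem
  intro acc t _
  by_cases hm : key ∈ t.map Prod.fst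
  · rw [if_pos ((pvAny_eq_mem t key).mpr hm), if_pos hm]
  · rw [if_neg (fun h => hm ((pvAny_eq_mem t key).mp h)), if_neg hm]

-- getD of a fold of inserts whose value depends only on the key
theorem pvGetD_foldl_insert_fn (f : String → Int) (qv : List String) (d : PySem.Dict String Int)
    (k : String) :
    (qv.foldl (fun d key => d.insert key (f key)) d).getD k 0
      = if k ∈ qv then f k else d.getD k 0 := by
  induction qv generalizing d with
  | nil => simp
  | cons key qv ih =>
    simp only [List.foldl_cons]
    rw [ih]
    by_cases hq : k ∈ qv
    · rw [if_pos hq, if_pos (List.mem_cons_of_mem _ hq)]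
    · rw [if_neg hq, PySem.Dict.getD_insert]
      by_cases hkk : k = key
      · subst hkk; simp
      · rw [if_neg hkk, if_neg (by simp [hkk, hq])]

-- keys of the seeding fold are set(query_vector)
theorem pvKeys_seeded (f : String → Int) (qv : List String) :
    (qv.foldl (fun d key => d.insert key (f key)) PySem.Dict.empty).keys
      = PySem.Set.ofList qv := by
  rw [PySem.Dict.keys_foldl_insert qv (fun _ key => f key) PySem.Dict.empty,
    PySem.Dict.keys_empty, PySem.Set.update_nil_left]

-- B's inner document loop: effect on getD
theorem pvB_inner_getD (qs : PySem.Set String) (ks : List String) (d : PySem.Dict String Int)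
    (k : String) :
    (ks.foldl (fun d key => if qs.contains key then d.insert key (d.getD key 0 + 1) else d) d).getD k 0
      = d.getD k 0 + (if qs.contains k then (ks.count k : Int) else 0) := by
  induction ks generalizing d with
  | nil => simp
  | cons key ks ih =>
    simp only [List.foldl_cons]
    by_cases hq : qs.contains key
    · rw [if_pos hq, ih, PySem.Dict.getD_insert]
      by_cases hkk : k = key
      · subst hkk
        rw [if_pos hq, if_pos hq, if_pos rfl, List.count_cons_self]
        push_cast
        ring
      · rw [if_neg hkk, List.count_cons_of_ne (Ne.symm hkk)]
    · rw [if_neg hq, ih]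
      by_cases hkk : k = key
      · subst hkk
        rw [if_neg hq, if_neg hq]
      · rw [List.count_cons_of_ne (Ne.symm hkk)]

-- B's inner loop preserves the key list when every query-set member is already a key
theorem pvB_inner_keys (qs : PySem.Set String) (ks : List String) (d : PySem.Dict String Int)
    (h : ∀ x, qs.contains x = true → d.contains x = true) :
    (ks.foldl (fun d key => if qs.contains key then d.insert key (d.getD key 0 + 1) else d) d).keys
      = d.keys := by
  induction ks generalizing d with
  | nil => rfl
  | cons key ks ih =>
    simp only [List.foldl_cons]
    by_cases hq : qs.contains key
    · rw [if_pos hq]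
      rw [ih _ (fun x hx => by
        rw [PySem.Dict.contains_insert]
        simp [h x hx])]
      exact PySem.Dict.keys_insert_of_contains _ _ (h key hq)
    · rw [if_neg hq]
      exact ih d h

-- B's outer document loop: effect on getD
theorem pvB_outer_getD (qs : PySem.Set String) (dht : List (List (String × Int)))
    (d : PySem.Dict String Int) (k : String) :
    (dht.foldl (fun d t =>
        (PySem.List.dedup (t.map Prod.fst)).foldl
          (fun d key => if qs.contains key then d.insert key (d.getD key 0 + 1) else d) d) d).getD k 0
      = d.getD k 0 + (if qs.contains k then pvDocCount dht k else 0) := by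
  induction dht generalizing d with
  | nil => simp [pvDocCount]
  | cons t dht ih =>
    simp only [List.foldl_cons]
    rw [ih, pvB_inner_getD]
    have hcnt : ((PySem.List.dedup (t.map Prod.fst)).count k : Int)
        = if k ∈ t.map Prod.fst then 1 else 0 := by
      by_cases hm : k ∈ t.map Prod.fst
      · rw [if_pos hm,
          List.count_eq_one_of_mem (PySem.List.nodup_dedup _) ((PySem.List.mem_dedup _ _).mpr hm)]
        rfl
      · rw [if_neg hm,
          List.count_eq_zero_of_not_mem (fun hh => hm ((PySem.List.mem_dedup _ _).mp hh))]
        rfl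
    rw [hcnt]
    have hdc : pvDocCount (t :: dht) k
        = (if k ∈ t.map Prod.fst then (1:Int) else 0) + pvDocCount dht k := by
      unfold pvDocCount
      simp only [List.foldl_cons]
      rw [pvFoldl_count_shift dht k (if k ∈ t.map Prod.fst then (0:Int) + 1 else 0),
        pvFoldl_count_shift dht k 0]
      split_ifs <;> omega
    rw [hdc]
    split_ifs <;> omega

-- B's outer loop preserves the key list
theorem pvB_outer_keys (qs : PySem.Set String) (dht : List (List (String × Int)))
    (d : PySem.Dict String Int) (h : ∀ x, qs.contains x = true → d.contains x = true) :
    (dht.foldl (fun d t =>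
        (PySem.List.dedup (t.map Prod.fst)).foldl
          (fun d key => if qs.contains key then d.insert key (d.getD key 0 + 1) else d) d) d).keys
      = d.keys := by
  induction dht generalizing d with
  | nil => rfl
  | cons t dht ih =>
    simp only [List.foldl_cons]
    have hk := pvB_inner_keys qs (PySem.List.dedup (t.map Prod.fst)) d h
    rw [ih _ (fun x hx => by
      rw [PySem.Dict.contains_iff_mem_keys, hk, ← PySem.Dict.contains_iff_mem_keys]
      exact h x hx), hk]

-- ===== VERDICT (by name: the statement is the Claim_ definition above) =====
theorem compute_doc_frequencies_spec : Claim_equal_compute_doc_frequencies := by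
  intro dht qv _
  unfold Spec_compute_doc_frequencies compute_doc_frequencies compute_doc_frequencies_alt
  simp only [pvA_inner]
  have hseedkeys := pvKeys_seeded (fun _ => (0:Int)) qv
  have hcontains : ∀ x, (PySem.Set.ofList qv).contains x = true →
      (qv.foldl (fun d key => d.insert key (0:Int)) PySem.Dict.empty).contains x = true := by
    intro x hx
    rw [PySem.Dict.contains_iff_mem_keys, hseedkeys]
    exact (PySem.Set.contains_iff _ _).mp hx
  have hkeysB := pvB_outer_keys (PySem.Set.ofList qv) dht _ hcontains
  have hkeysA := pvKeys_seeded (fun key => pvDocCount dht key) qv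
  rw [PySem.Dict.items_eq_map_keys _ (by rw [hkeysA]; exact PySem.Set.nodup_ofList qv) 0,
    PySem.Dict.items_eq_map_keys _ (by rw [hkeysB, hseedkeys]; exact PySem.Set.nodup_ofList qv) 0,
    hkeysA, hkeysB, hseedkeys]
  apply List.map_congr_left
  intro k hk
  have hkq : k ∈ qv := (PySem.Set.mem_ofList _ _).mp hk
  rw [pvGetD_foldl_insert_fn, if_pos hkq, pvB_outer_getD, pvGetD_foldl_insert_fn, if_pos hkq,
    if_pos ((PySem.Set.contains_iff _ _).mpr hk)]
  simp
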